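-- pv_equiv track=rewrite | github.com/pnnl/BIM2RDF | mapping/mapping.py | strip_constraint
-- ===== SOURCE A (Python) =====
-- def strip_constraint(tbl_schema: str) -> str:
--     # todo: inelegant
--     has_constraint = lambda s: ('constraint "' in s.lower()) #or ('primary key' in s.lower())
--     if not has_constraint(tbl_schema):
--         return tbl_schema
--     else:
--         parts = []
--         for part in tbl_schema.split(','):
--             if not has_constraint(part): parts.append(part)
--             else: break # expecting contraints to be last
--         tbl_schema = ','.join(parts)
--         tbl_schema += ')'
--         assert(not has_constraint(tbl_schema))
--         return tbl_schema
-- ===== SOURCE B (Python) =====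
-- def strip_constraint(tbl_schema: str) -> str:
--     idx = tbl_schema.lower().find('constraint "')
--     if idx == -1:
--         return tbl_schema
--     comma = tbl_schema.rfind(',', 0, idx)
--     return (tbl_schema[:comma] if comma != -1 else '') + ')'
-- ===== Notes on version B (the rewrite author's own statement) =====
-- stated objective: idiomatic
-- what changed: Replaces the split-on-comma list-building loop with direct index arithmetic: find the first case-insensitive occurrence of the constraint marker, rfind the last comma before it, and slice the original string once.
import Mathlib
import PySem

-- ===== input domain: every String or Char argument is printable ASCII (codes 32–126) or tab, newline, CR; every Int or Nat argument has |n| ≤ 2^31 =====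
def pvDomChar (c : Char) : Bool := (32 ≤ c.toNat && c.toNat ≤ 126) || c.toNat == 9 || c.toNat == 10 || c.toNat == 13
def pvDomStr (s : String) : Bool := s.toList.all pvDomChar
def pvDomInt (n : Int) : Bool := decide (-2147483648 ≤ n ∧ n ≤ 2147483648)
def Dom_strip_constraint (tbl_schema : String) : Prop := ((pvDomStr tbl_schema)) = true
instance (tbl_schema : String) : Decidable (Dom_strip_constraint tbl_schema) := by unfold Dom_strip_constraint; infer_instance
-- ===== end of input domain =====

-- B replaces A's split-on-comma loop by a direct find / rfind index computation and one slice (same result, idiomatic).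


-- ===== PORT A =====
-- has_constraint = lambda s: ('constraint "' in s.lower())
def pvHasConstraint (s : List Char) : Bool :=
  PySem.Chars.isIn "constraint \"".toList (PySem.Chars.lower s)

-- the for-loop with break: collect parts until the first one containing the pattern
def pvPartsLoop : List (List Char) → List (List Char) → List (List Char)
  | [], acc => acc.reverse
  | p :: rest, acc => if pvHasConstraint p then acc.reverse else pvPartsLoop rest (p :: acc)

-- (the assert in A never fires — the joined prefix cannot contain the pattern — so it has no observable effect)
def strip_constraint (tbl_schema : String) : String :=
  if !pvHasConstraint tbl_schema.toList then tbl_schema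
  else
    let parts := pvPartsLoop (PySem.Chars.splitOn tbl_schema.toList ",".toList) []
    String.ofList (PySem.Chars.join ",".toList parts ++ ")".toList)

-- ===== PORT B =====
def strip_constraint_alt (tbl_schema : String) : String :=
  let idx := PySem.Str.find (PySem.Str.lower tbl_schema) "constraint \""
  if idx = -1 then tbl_schema
  else
    let comma := PySem.Str.rfindFrom tbl_schema "," 0 (some idx)
    String.ofList ((if comma ≠ -1 then PySem.Chars.slice tbl_schema.toList none (some comma) else []) ++ ")".toList)

-- ===== PRECONDITION & SPEC =====
def Spec_strip_constraint (tbl_schema : String) (out : String) : Prop := out = strip_constraint_alt tbl_schema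
instance (tbl_schema : String) (out : String) : Decidable (Spec_strip_constraint tbl_schema out) := by unfold Spec_strip_constraint; infer_instance

-- ===== CLAIM (what is proved, stated in full; the proofs are below) =====
def Claim_equal_strip_constraint : Prop := ∀ (tbl_schema : String), Dom_strip_constraint tbl_schema → Spec_strip_constraint tbl_schema (strip_constraint tbl_schema)

-- ===== LEMMAS AND PROOFS =====

-- the pattern, for the proofs
def pvPat : List Char := "constraint \"".toList

theorem pvPat_len : pvPat.length = 12 := by decide
theorem pvPat_no_comma : ',' ∉ pvPat := by decide

-- ---------- reference single-separator split and the bridge to PySem.Chars.splitOn ----------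
def pvSplit : List Char → List Char → List (List Char)
  | [], cur => [cur.reverse]
  | c :: rest, cur => if c = ',' then cur.reverse :: pvSplit rest [] else pvSplit rest (c :: cur)

theorem pvSplitOn_go_eq (fuel : Nat) : ∀ (l cur : List Char) (acc : List (List Char)) (_h : l.length ≤ fuel),
    PySem.Chars.splitOn.go [','] fuel l cur acc = acc.reverse ++ pvSplit l cur := by
  induction fuel with
  | zero => intro l cur acc h
            have : l = [] := by cases l <;> simp_all
            subst this
            rw [PySem.Chars.splitOn.go.eq_def]
            simp [pvSplit]
  | succ n ih => intro l cur acc h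
                 cases l with
                 | nil => rw [PySem.Chars.splitOn.go.eq_def]; simp [pvSplit]
                 | cons c rest =>
                   rw [PySem.Chars.splitOn.go.eq_def]
                   simp only [List.length_cons] at h
                   by_cases hc : c = ','
                   · subst hc
                     simp only [List.isPrefixOf_cons₂_self, List.isPrefixOf_nil_left, if_pos]
                     rw [ih _ _ _ (by simpa using h)]
                     simp [pvSplit]
                   · have hpf : ([','].isPrefixOf (c :: rest)) = false := by
                       rw [List.isPrefixOf_cons₂]
                       simp [List.isPrefixOf_nil_left, Ne.symm hc]
                     simp only [hpf, if_false, Bool.false_eq_true]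
                     rw [ih _ _ _ (by omega)]
                     simp [pvSplit, hc]

theorem pvSplitOn_comma (s : List Char) : PySem.Chars.splitOn s [','] = pvSplit s [] := by
  rw [PySem.Chars.splitOn, pvSplitOn_go_eq (s.length+1) s [] [] (by omega)]
  simp

theorem pvSplit_no_comma : ∀ (l cur : List Char), ',' ∉ l → pvSplit l cur = [cur.reverse ++ l]
  | [], cur, _ => by simp [pvSplit]
  | c :: rest, cur, h => by
      have hc : c ≠ ',' := fun hc => h (hc ▸ List.mem_cons_self)
      rw [pvSplit, if_neg hc, pvSplit_no_comma rest (c :: cur) (fun hm => h (List.mem_cons_of_mem _ hm))]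
      simp

theorem pvSplit_append : ∀ (seg : List Char), ',' ∉ seg → ∀ (rest cur : List Char),
    pvSplit (seg ++ ',' :: rest) cur = (cur.reverse ++ seg) :: pvSplit rest []
  | [], _, rest, cur => by simp [pvSplit]
  | c :: seg', h, rest, cur => by
      have hc : c ≠ ',' := fun hc => h (hc ▸ List.mem_cons_self)
      rw [List.cons_append, pvSplit, if_neg hc,
          pvSplit_append seg' (fun hm => h (List.mem_cons_of_mem _ hm)) rest (c :: cur)]
      simp

-- ---------- A's loop is takeWhile ----------
theorem pvPartsLoop_eq : ∀ (ps acc : List (List Char)),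
    pvPartsLoop ps acc = acc.reverse ++ ps.takeWhile (fun p => !pvHasConstraint p)
  | [], acc => by simp [pvPartsLoop]
  | p :: rest, acc => by
      rw [pvPartsLoop]
      by_cases h : pvHasConstraint p
      · simp [h]
      · simp only [h, if_false, Bool.false_eq_true, pvPartsLoop_eq rest (p :: acc)]
        simp [h]

-- ---------- single-character prefix facts ----------
theorem prefixOf_comma (l : List Char) : ([','].isPrefixOf l = true) ↔ l.head? = some ',' := by
  cases l with
  | nil => simp [List.isPrefixOf]
  | cons c t =>
    rw [List.isPrefixOf_cons₂]
    simp only [List.isPrefixOf_nil_left, Bool.and_true, beq_iff_eq, List.head?_cons, Option.some_inj]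
    exact eq_comm

theorem prefixOf_comma_drop (s : List Char) (i : Nat) :
    ([','].isPrefixOf (s.drop i) = true) ↔ s[i]? = some ',' := by
  rw [prefixOf_comma, List.head?_drop]

-- ---------- characterisation of PySem.Chars.rfind ----------
theorem rgo_cases (s sub : List Char) (j : Nat) :
    (PySem.Chars.rfind.go s sub j = -1 ∧ ∀ i ≤ j, ¬ sub.isPrefixOf (s.drop i) = true) ∨
    (∃ k : Nat, k ≤ j ∧ PySem.Chars.rfind.go s sub j = (k : Int) ∧ sub.isPrefixOf (s.drop k) = true ∧
      ∀ i, k < i → i ≤ j → ¬ sub.isPrefixOf (s.drop i) = true) := by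
  induction j with
  | zero =>
    rw [PySem.Chars.rfind.go]
    by_cases h : sub.isPrefixOf s = true
    · right; exact ⟨0, le_refl _, by simp [h], by simpa [List.drop_zero] using h, by omega⟩
    · left
      refine ⟨by simp [h], ?_⟩
      intro i hi
      have : i = 0 := by omega
      subst this
      simpa [List.drop_zero] using h
  | succ j ih =>
    rw [PySem.Chars.rfind.go]
    by_cases h : sub.isPrefixOf (s.drop (j+1)) = true
    · right
      exact ⟨j+1, le_refl _, by simp [h], h, by omega⟩
    · simp only [h, if_false, Bool.false_eq_true]
      rcases ih with ⟨he, hall⟩ | ⟨k, hk, he, hp, hmax⟩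
      · left
        refine ⟨he, ?_⟩
        intro i hi
        rcases Nat.lt_succ_iff_lt_or_eq.mp (Nat.lt_succ_of_le hi) with h' | h'
        · exact hall i (by omega)
        · subst h'; exact fun hc => h hc
      · right
        refine ⟨k, by omega, he, hp, ?_⟩
        intro i h1 h2
        rcases Nat.lt_or_ge i (j+1) with h' | h'
        · exact hmax i h1 (by omega)
        · have : i = j + 1 := by omega
          subst this; exact fun hc => h hc

theorem rfind_cases (s sub : List Char) :
    PySem.Chars.rfind s sub = -1 ∨
    ∃ k : Nat, k ≤ s.length ∧ PySem.Chars.rfind s sub = (k : Int) := by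
  rw [PySem.Chars.rfind]
  rcases rgo_cases s sub s.length with ⟨he, _⟩ | ⟨k, hk, he, _, _⟩
  · exact Or.inl he
  · exact Or.inr ⟨k, hk, he⟩

theorem rfind_eq_of (s sub : List Char) (k : Nat) (hk : k ≤ s.length)
    (hp : sub.isPrefixOf (s.drop k) = true)
    (hmax : ∀ i, k < i → i ≤ s.length → ¬ sub.isPrefixOf (s.drop i) = true) :
    PySem.Chars.rfind s sub = (k : Int) := by
  rw [PySem.Chars.rfind]
  rcases rgo_cases s sub s.length with ⟨_, hall⟩ | ⟨k', hk', he, hp', hmax'⟩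
  · exact absurd hp (hall k hk)
  · rw [he]
    congr 1
    rcases Nat.lt_trichotomy k k' with h | h | h
    · exact absurd hp' (hmax k' h hk')
    · omega
    · exact absurd hp (hmax' k h hk)

theorem rfind_comma_neg_one_iff (s : List Char) :
    PySem.Chars.rfind s [','] = -1 ↔ ',' ∉ s := by
  rw [PySem.Chars.rfind]
  rcases rgo_cases s [','] s.length with ⟨he, hall⟩ | ⟨k, hk, he, hp, _⟩
  · simp only [he, true_iff]
    intro hm
    rcases List.getElem_of_mem hm with ⟨i, hi, hgi⟩
    exact hall i (by omega) ((prefixOf_comma_drop s i).mpr (by rw [List.getElem?_eq_getElem hi, hgi]))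
  · rw [he]
    constructor
    · intro h; omega
    · intro hm
      exact absurd (List.mem_of_getElem? ((prefixOf_comma_drop s k).mp hp)) hm

theorem rfind_comma_append (seg t : List Char) :
    PySem.Chars.rfind (seg ++ ',' :: t) [','] =
      if PySem.Chars.rfind t [','] = -1 then (seg.length : Int)
      else (seg.length : Int) + 1 + PySem.Chars.rfind t [','] := by
  by_cases h : PySem.Chars.rfind t [','] = -1
  · rw [if_pos h]
    apply rfind_eq_of _ _ _ (by simp)
    · rw [List.drop_left, prefixOf_comma]
      simp
    · intro i h1 h2 hc
      rw [prefixOf_comma_drop] at hc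
      rw [List.getElem?_append_right (by omega)] at hc
      have : i - seg.length = (i - seg.length - 1) + 1 := by omega
      rw [this, List.getElem?_cons_succ] at hc
      exact (rfind_comma_neg_one_iff t).mp h (List.mem_of_getElem? hc)
  · rcases rgo_cases t [','] t.length with ⟨he, _⟩ | ⟨k, hk, he, hp, hmax⟩
    · exact absurd (by rw [PySem.Chars.rfind]; exact he) h
    · have hrt : PySem.Chars.rfind t [','] = (k : Int) := by rw [PySem.Chars.rfind]; exact he
      rw [if_neg h, hrt]
      have : (seg.length : Int) + 1 + (k : Int) = ((seg.length + 1 + k : Nat) : Int) := by push_cast; ring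
      rw [this]
      apply rfind_eq_of _ _ _ (by simp; omega)
      · have hd : (seg ++ ',' :: t).drop (seg.length + 1 + k) = t.drop k := by
          rw [List.drop_append]
          rw [List.drop_eq_nil_of_le (show seg.length ≤ seg.length + 1 + k from by omega)]
          simp [show seg.length + 1 + k - seg.length = k + 1 from by omega]
        rw [hd]; exact hp
      · intro i h1 h2 hc
        rw [prefixOf_comma_drop] at hc
        rw [List.getElem?_append_right (by omega)] at hc
        have hi2 : i - seg.length = (i - seg.length - 1) + 1 := by omega
        rw [hi2, List.getElem?_cons_succ] at hc
        refine hmax (i - seg.length - 1) (by omega) ?_ ((prefixOf_comma_drop t _).mpr hc)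
        have := List.getElem?_eq_some_iff.mp hc
        simp at h2
        omega

-- ---------- find side ----------
theorem infix_iff_exists_drop (sub s : List Char) : sub <:+: s ↔ ∃ k, sub <+: s.drop k := by
  constructor
  · rintro ⟨p, q, rfl⟩
    exact ⟨p.length, by simp⟩
  · rintro ⟨k, t, ht⟩
    exact ⟨s.take k, t, by rw [List.append_assoc, ht, List.take_append_drop]⟩

-- ---------- the pattern cannot straddle a comma ----------
theorem drop_append_comma (x y : List Char) (k : Nat) :
    (x ++ ',' :: y).drop (x.length + 1 + k) = y.drop k := by
  rw [List.drop_append]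
  rw [List.drop_eq_nil_of_le (show x.length ≤ x.length + 1 + k from by omega)]
  simp [show x.length + 1 + k - x.length = k + 1 from by omega]

theorem take_append_comma (x y : List Char) (k : Nat) :
    (x ++ ',' :: y).take (x.length + 1 + k) = x ++ ',' :: y.take k := by
  rw [List.take_append]
  rw [List.take_of_length_le (show x.length ≤ x.length + 1 + k from by omega)]
  simp [show x.length + 1 + k - x.length = k + 1 from by omega]

theorem occ_in_left {x : List Char} (z : List Char) {i : Nat} (h : pvPat <+: x.drop i) :
    pvPat <+: (x ++ z).drop i := by
  rcases Nat.lt_or_ge x.length i with hi | hi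
  · rw [List.drop_eq_nil_of_le (by omega)] at h
    have := h.length_le
    simp [pvPat_len] at this
  · rw [List.drop_append_of_le_length hi]
    exact h.trans (List.prefix_append _ _)

theorem occ_in_right (x : List Char) {y : List Char} {i : Nat} (h : pvPat <+: y.drop i) :
    pvPat <+: (x ++ ',' :: y).drop (x.length + 1 + i) := by
  rw [drop_append_comma]; exact h

theorem occ_split {x y : List Char} {i : Nat} (h : pvPat <+: (x ++ ',' :: y).drop i) :
    (i + pvPat.length ≤ x.length ∧ pvPat <+: x.drop i) ∨
    (x.length + 1 ≤ i ∧ pvPat <+: y.drop (i - x.length - 1)) := by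
  by_cases h1 : i + pvPat.length ≤ x.length
  · left
    refine ⟨h1, ?_⟩
    rw [List.drop_append_of_le_length (by omega)] at h
    rw [List.prefix_iff_eq_take] at h ⊢
    rw [List.take_append_of_le_length (by simp; omega)] at h
    exact h
  · by_cases h2 : i ≤ x.length
    · exfalso
      have hj : x.length - i < pvPat.length := by omega
      have hje : pvPat[x.length - i]'hj = ((x ++ ',' :: y).drop i)[x.length - i]'(by
        simp
        omega) := List.IsPrefix.getElem h hj
      rw [List.getElem_drop] at hje
      have hco : (x ++ ',' :: y)[i + (x.length - i)]'(by simp; omega) = ',' := by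
        have hxi : i + (x.length - i) = x.length := by omega
        simp only [hxi]
        rw [List.getElem_append_right (by omega)]
        simp
      rw [hco] at hje
      have hmem : ',' ∈ pvPat := by rw [← hje]; exact List.getElem_mem hj
      exact pvPat_no_comma hmem
    · right
      refine ⟨by omega, ?_⟩
      have := drop_append_comma x y (i - x.length - 1)
      rw [show x.length + 1 + (i - x.length - 1) = i from by omega] at this
      rwa [this] at h

-- ---------- lower-case plumbing ----------
theorem lower_append_comma (x y : List Char) :
    PySem.Chars.lower (x ++ ',' :: y) = PySem.Chars.lower x ++ ',' :: PySem.Chars.lower y := by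
  simp [PySem.Chars.lower, show PySem.Chars.lowerChar ',' = ',' from by decide]

theorem lower_length (x : List Char) : (PySem.Chars.lower x).length = x.length := by
  simp [PySem.Chars.lower]

theorem hasConstraint_iff (p : List Char) :
    pvHasConstraint p = true ↔ pvPat <:+: PySem.Chars.lower p := by
  rw [pvHasConstraint, PySem.Chars.isIn_iff_infix]
  rfl

theorem exists_comma_split : ∀ {L : List Char}, ',' ∈ L →
    ∃ seg rest, (',' ∉ seg) ∧ L = seg ++ ',' :: rest
  | [], h => absurd h (List.not_mem_nil)
  | c :: t, h => by
      by_cases hc : c = ','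
      · exact ⟨[], t, by simp, by simp [hc]⟩
      · have hct : ',' ∈ t := by
          rcases List.mem_cons.mp h with h' | h'
          · exact absurd h'.symm hc
          · exact h'
        rcases exists_comma_split hct with ⟨seg, rest, hseg, hrest⟩
        refine ⟨c :: seg, rest, ?_, by simp [hrest]⟩
        intro hm
        rcases List.mem_cons.mp hm with h' | h'
        · exact hc h'.symm
        · exact hseg h'

-- ---------- the rfindFrom call B makes is an rfind on a prefix ----------
theorem rfindFrom_zero_some (L sub : List Char) (idx : Int) (h0 : 0 ≤ idx) (h1 : idx ≤ L.length) :
    PySem.Chars.rfindFrom L sub 0 (some idx) = PySem.Chars.rfind (L.take idx.toNat) sub := by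
  have hnot : ((L.length : Int) < idx) = False := by simp; omega
  have hnot2 : (idx < (0:Int)) = False := by simp; omega
  simp only [PySem.Chars.rfindFrom, hnot, hnot2, if_false, lt_irrefl, Int.toNat_zero, List.drop_zero]
  by_cases hr : PySem.Chars.rfind (List.take idx.toNat L) sub = -1
  · rw [if_pos hr, hr]
  · rw [if_neg hr]; ring

-- ---------- the main correspondence ----------
theorem pv_main : ∀ (n : Nat) (L : List Char), L.length ≤ n →
    pvPat <:+: PySem.Chars.lower L →
    ((PySem.Chars.rfind (L.take (PySem.Chars.find (PySem.Chars.lower L) pvPat).toNat) [','] = -1 ↔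
        (pvSplit L []).takeWhile (fun p => !pvHasConstraint p) = []) ∧
     (∀ k : Nat,
        PySem.Chars.rfind (L.take (PySem.Chars.find (PySem.Chars.lower L) pvPat).toNat) [','] = (k : Int) →
        PySem.Chars.join [','] ((pvSplit L []).takeWhile (fun p => !pvHasConstraint p)) = L.take k)) := by
  intro n
  induction n with
  | zero =>
    intro L hL hin
    have : L = [] := by cases L <;> simp_all
    subst this
    exfalso
    have := hin.length_le
    simp [pvPat_len, PySem.Chars.lower] at this
  | succ n ih =>
    intro L hL hin
    have h0 : 0 ≤ PySem.Chars.find (PySem.Chars.lower L) pvPat :=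
      (PySem.Chars.find_nonneg_iff _ _).mpr hin
    obtain ⟨hfp, hfmin⟩ := PySem.Chars.find_spec h0
    by_cases hc : ',' ∈ L
    · -- L has at least one comma: split it at the first one
      obtain ⟨seg, rest, hsegc, rfl⟩ := exists_comma_split hc
      have hlow : PySem.Chars.lower (seg ++ ',' :: rest)
          = PySem.Chars.lower seg ++ ',' :: PySem.Chars.lower rest := lower_append_comma seg rest
      by_cases hbad : pvHasConstraint seg = true
      · -- very first part contains the pattern
        have hinf : pvPat <:+: PySem.Chars.lower seg := (hasConstraint_iff seg).mp hbad
        obtain ⟨k0, hk0⟩ := (infix_iff_exists_drop _ _).mp hinf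
        have hk0len : k0 < seg.length := by
          by_contra hge
          rw [List.drop_eq_nil_of_le (by rw [lower_length]; omega)] at hk0
          have := hk0.length_le
          simp [pvPat_len] at this
        have hocc : pvPat <+: (PySem.Chars.lower (seg ++ ',' :: rest)).drop k0 := by
          rw [hlow]; exact occ_in_left _ hk0
        have hile : (PySem.Chars.find (PySem.Chars.lower (seg ++ ',' :: rest)) pvPat).toNat ≤ k0 := by
          by_contra hgt
          exact hfmin k0 (by omega) hocc
        have htw : (pvSplit (seg ++ ',' :: rest) []).takeWhile (fun p => !pvHasConstraint p) = [] := by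
          rw [show pvSplit (seg ++ ',' :: rest) [] = seg :: pvSplit rest [] from by
            simpa using pvSplit_append seg hsegc rest []]
          simp [hbad]
        have hrf : PySem.Chars.rfind ((seg ++ ',' :: rest).take
            (PySem.Chars.find (PySem.Chars.lower (seg ++ ',' :: rest)) pvPat).toNat) [','] = -1 := by
          rw [rfind_comma_neg_one_iff]
          intro hm
          rw [List.take_append_of_le_length (by omega)] at hm
          exact hsegc (List.mem_of_mem_take hm)
        refine ⟨⟨fun _ => htw, fun _ => hrf⟩, ?_⟩
        intro k hk
        rw [hrf] at hk
        omega
      · -- first part clean: the occurrence is in `rest`, recurse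
        rw [hlow] at hfp hfmin ⊢
        rcases occ_split hfp with ⟨_, hpl⟩ | ⟨hge, hpr⟩
        · exact absurd ((infix_iff_exists_drop _ _).mpr ⟨_, hpl⟩)
            (fun hinf => hbad ((hasConstraint_iff seg).mpr hinf))
        · have hinr : pvPat <:+: PySem.Chars.lower rest := (infix_iff_exists_drop _ _).mpr ⟨_, hpr⟩
          have h0r : 0 ≤ PySem.Chars.find (PySem.Chars.lower rest) pvPat :=
            (PySem.Chars.find_nonneg_iff _ _).mpr hinr
          obtain ⟨hfpr, hfminr⟩ := PySem.Chars.find_spec h0r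
          have hieq : (PySem.Chars.find (PySem.Chars.lower seg ++ ',' :: PySem.Chars.lower rest) pvPat).toNat
              = seg.length + 1 + (PySem.Chars.find (PySem.Chars.lower rest) pvPat).toNat := by
            have hle1 : (PySem.Chars.find (PySem.Chars.lower seg ++ ',' :: PySem.Chars.lower rest) pvPat).toNat
                ≤ (PySem.Chars.lower seg).length + 1
                  + (PySem.Chars.find (PySem.Chars.lower rest) pvPat).toNat := by
              by_contra hgt
              exact hfmin ((PySem.Chars.lower seg).length + 1
                + (PySem.Chars.find (PySem.Chars.lower rest) pvPat).toNat)
                (by omega) (occ_in_right _ hfpr)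
            have hle2 : (PySem.Chars.find (PySem.Chars.lower rest) pvPat).toNat
                ≤ (PySem.Chars.find (PySem.Chars.lower seg ++ ',' :: PySem.Chars.lower rest) pvPat).toNat
                  - (PySem.Chars.lower seg).length - 1 := by
              by_contra hgt
              exact hfminr ((PySem.Chars.find (PySem.Chars.lower seg ++ ',' :: PySem.Chars.lower rest) pvPat).toNat
                - (PySem.Chars.lower seg).length - 1) (by omega) hpr
            rw [lower_length] at hle1 hle2 hge
            omega
          have htw : (pvSplit (seg ++ ',' :: rest) []).takeWhile (fun p => !pvHasConstraint p)
              = seg :: (pvSplit rest []).takeWhile (fun p => !pvHasConstraint p) := by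
            rw [show pvSplit (seg ++ ',' :: rest) [] = seg :: pvSplit rest [] from by
              simpa using pvSplit_append seg hsegc rest []]
            simp [hbad]
          have htake : (seg ++ ',' :: rest).take
              (PySem.Chars.find (PySem.Chars.lower seg ++ ',' :: PySem.Chars.lower rest) pvPat).toNat
              = seg ++ ',' :: rest.take (PySem.Chars.find (PySem.Chars.lower rest) pvPat).toNat := by
            rw [hieq]; exact take_append_comma _ _ _
          have hLlen : rest.length ≤ n := by simp at hL; omega
          obtain ⟨IH1, IH2⟩ := ih rest hLlen hinr
          have hne : PySem.Chars.rfind ((seg ++ ',' :: rest).take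
              (PySem.Chars.find (PySem.Chars.lower seg ++ ',' :: PySem.Chars.lower rest) pvPat).toNat) [','] ≠ -1 := by
            rw [htake, rfind_comma_append]
            rcases rfind_cases (rest.take (PySem.Chars.find (PySem.Chars.lower rest) pvPat).toNat)
                [','] with hr | ⟨k', _, hr⟩
            · rw [if_pos hr]; omega
            · rw [if_neg (by rw [hr]; omega), hr]; omega
          refine ⟨⟨fun h => absurd h hne, fun h => by rw [htw] at h; exact absurd h (by simp)⟩, ?_⟩
          intro k hk
          rw [htake, rfind_comma_append] at hk
          rw [htw]
          rcases rfind_cases (rest.take (PySem.Chars.find (PySem.Chars.lower rest) pvPat).toNat)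
              [','] with hr | ⟨k', _, hr⟩
          · rw [if_pos hr] at hk
            have hks : k = seg.length := by omega
            rw [IH1.mp hr, PySem.Chars.join_singleton, hks, List.take_left]
          · rw [if_neg (by rw [hr]; omega), hr] at hk
            have hks : k = seg.length + 1 + k' := by omega
            have htwr_ne : (pvSplit rest []).takeWhile (fun p => !pvHasConstraint p) ≠ [] :=
              fun he => by rw [← IH1] at he; rw [he] at hr; omega
            obtain ⟨p, ps, hpps⟩ : ∃ p ps,
                (pvSplit rest []).takeWhile (fun p => !pvHasConstraint p) = p :: ps := by
              cases h' : (pvSplit rest []).takeWhile (fun p => !pvHasConstraint p) with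
              | nil => exact absurd h' htwr_ne
              | cons p ps => exact ⟨p, ps, rfl⟩
            have hjr := IH2 k' hr
            rw [hpps] at hjr ⊢
            rw [PySem.Chars.join_cons_cons, hjr, hks, take_append_comma]
            simp
    · -- no comma anywhere: a single part, which contains the pattern
      have hsplit : pvSplit L [] = [L] := by simpa using pvSplit_no_comma L [] hc
      have hbadL : pvHasConstraint L = true := (hasConstraint_iff L).mpr hin
      have htw : (pvSplit L []).takeWhile (fun p => !pvHasConstraint p) = [] := by
        rw [hsplit]; simp [hbadL]
      have hrf : PySem.Chars.rfind
          (L.take (PySem.Chars.find (PySem.Chars.lower L) pvPat).toNat) [','] = -1 := by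
        rw [rfind_comma_neg_one_iff]
        exact fun hm => hc (List.mem_of_mem_take hm)
      refine ⟨⟨fun _ => htw, fun _ => hrf⟩, ?_⟩
      intro k hk
      rw [hrf] at hk
      omega

theorem hasConstraint_false_iff (L : List Char) :
    (!pvHasConstraint L) = true ↔
      PySem.Chars.find (PySem.Chars.lower L) "constraint \"".toList = -1 := by
  rw [pvHasConstraint, PySem.Chars.isIn]
  simp [bne]

-- ===== VERDICT (by name: the statement is the Claim_ definition above) =====
theorem strip_constraint_spec : Claim_equal_strip_constraint := by
  intro s _
  show strip_constraint s = strip_constraint_alt s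
  simp only [strip_constraint, strip_constraint_alt,
    PySem.Str.find_eq, PySem.Str.toList_lower, PySem.Str.rfindFrom_eq]
  by_cases hf : PySem.Chars.find (PySem.Chars.lower s.toList) "constraint \"".toList = -1
  · rw [if_pos ((hasConstraint_false_iff s.toList).mpr hf), if_pos hf]
  · rw [if_neg (fun h => hf ((hasConstraint_false_iff s.toList).mp h)), if_neg hf]
    have h0 : 0 ≤ PySem.Chars.find (PySem.Chars.lower s.toList) "constraint \"".toList := by
      have := PySem.Chars.neg_one_le_find (PySem.Chars.lower s.toList) "constraint \"".toList
      omega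
    have h1 : PySem.Chars.find (PySem.Chars.lower s.toList) "constraint \"".toList
        ≤ (s.toList.length : Int) := by
      have := PySem.Chars.find_le_length (PySem.Chars.lower s.toList) "constraint \"".toList
      rwa [lower_length] at this
    have hin : pvPat <:+: PySem.Chars.lower s.toList := by
      by_contra hni
      exact hf ((PySem.Chars.find_eq_neg_one_iff _ _).mpr hni)
    obtain ⟨M1, M2⟩ := pv_main s.toList.length s.toList le_rfl hin
    have hsep : (",".toList : List Char) = [','] := rfl
    have hpar : (")".toList : List Char) = [')'] := rfl
    rw [hsep, hpar, rfindFrom_zero_some s.toList [',']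
      (PySem.Chars.find (PySem.Chars.lower s.toList) "constraint \"".toList) h0 h1]
    rw [pvSplitOn_comma, pvPartsLoop_eq]
    rcases rfind_cases (s.toList.take
        (PySem.Chars.find (PySem.Chars.lower s.toList) "constraint \"".toList).toNat) [','] with hr | ⟨k, _, hr⟩
    · rw [hr]
      rw [M1.mp hr]
      simp [PySem.Chars.join_nil]
    · rw [hr]
      rw [if_pos (show (k : Int) ≠ -1 from by omega)]
      have hsl : PySem.Chars.slice s.toList none (some (k : Int)) = s.toList.take k := by
        rw [PySem.Chars.slice_eq_listSlice, PySem.List.slice_to_natCast]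
      rw [hsl]
      have hr' : PySem.Chars.rfind
          (List.take (PySem.Chars.find (PySem.Chars.lower s.toList) pvPat).toNat s.toList) [','] =
          (k : Int) := hr
      rw [List.reverse_nil, List.nil_append, M2 k hr']
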